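-- pv_equiv track=rewrite | github.com/mattchutwo/CryptographyProjects | HMAC Attack/forge.py | sample_MAC
-- ===== SOURCE A (Python) =====
-- KEY_ROWS = KEY_COLS = 16
--
-- KEY_ROWS = KEY_COLS = 16
--
-- def MAC_check(msg):
--     if (type(msg) != tuple or len(msg) != 2):
--         raise Exception("Input msg must be a tuple of length 2")
--     if (type(msg[0])!=int or type(msg[1])!=int):
--         raise Exception("Elements of the tuple must be integers")
--     if (not(0<=msg[0]<KEY_ROWS and 0<=msg[1]<KEY_COLS)):
--         raise Exception(f"The msg must be of the form (m, n) where 0<=m<{KEY_ROWS} and 0<=n<{KEY_COLS}")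
--
-- def sample_MAC(msg):
--     MAC_check(msg)
--     key = [[(i+(10*j))%101 for i in range(KEY_COLS)] for j in range(KEY_ROWS)]
--
--     m, n = msg
--     s, t = (0, 0)
--
--     for row in key[:m+1]:
--         s+=row[n]
--
--     for element in key[m][:n+1]:
--         t+= element
--
--     return (s, t)
-- ===== SOURCE B (Python) =====
-- KEY_ROWS = KEY_COLS = 16
--
-- def MAC_check(msg):
--     if (type(msg) != tuple or len(msg) != 2):
--         raise Exception("Input msg must be a tuple of length 2")
--     if (type(msg[0])!=int or type(msg[1])!=int):
--         raise Exception("Elements of the tuple must be integers")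
--     if (not(0<=msg[0]<KEY_ROWS and 0<=msg[1]<KEY_COLS)):
--         raise Exception(f"The msg must be of the form (m, n) where 0<=m<{KEY_ROWS} and 0<=n<{KEY_COLS}")
--
-- def sample_MAC(msg):
--     MAC_check(msg)
--     m, n = msg
--     # column sum: sum_{j=0..m} (n+10j) mod 101, via arithmetic series minus wraps
--     wraps_s = max(0, m - (110 - n) // 10 + 1)   # j with n+10j >= 101
--     s = (m + 1) * n + 5 * m * (m + 1) - 101 * wraps_s
--     # row sum: sum_{i=0..n} (10m+i) mod 101
--     wraps_t = max(0, n - (101 - 10 * m) + 1) if 101 - 10 * m > 0 else n + 1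
--     t = (n + 1) * 10 * m + n * (n + 1) // 2 - 101 * wraps_t
--     return (s, t)
-- ===== Notes on version B (the rewrite author's own statement) =====
-- stated objective: simpler
-- what changed: Replaced building the 16x16 modular key table and summing slices of it with closed-form arithmetic-series formulas plus an exact count of mod-101 wraps.
import Mathlib
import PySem

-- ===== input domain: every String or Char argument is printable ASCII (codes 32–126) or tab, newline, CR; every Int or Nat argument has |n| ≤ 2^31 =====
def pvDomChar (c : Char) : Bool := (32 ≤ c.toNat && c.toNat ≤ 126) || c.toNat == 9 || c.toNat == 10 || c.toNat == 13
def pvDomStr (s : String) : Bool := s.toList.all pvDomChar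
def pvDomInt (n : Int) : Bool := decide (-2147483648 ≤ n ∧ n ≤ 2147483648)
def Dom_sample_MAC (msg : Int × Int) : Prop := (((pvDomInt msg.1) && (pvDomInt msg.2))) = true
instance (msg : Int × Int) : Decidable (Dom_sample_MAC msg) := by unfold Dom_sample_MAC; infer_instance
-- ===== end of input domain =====

-- B replaces the materialized 16x16 modular key table and the two slice scans by
-- closed-form arithmetic-series formulas with an explicit mod-101 wrap count (simpler, no loops).
-- Pre_ excludes exactly the inputs on which A's MAC_check raises (m or n outside 0..15).

-- ===== PORT A =====
def sample_MAC (msg : Int × Int) : Int × Int :=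
  let key : List (List Int) :=
    (PySem.List.pyRange 0 16 1).map (fun j =>
      (PySem.List.pyRange 0 16 1).map (fun i => PySem.Int.mod (i + 10 * j) 101))
  let m := msg.1
  let n := msg.2
  -- for row in key[:m+1]: s += row[n]   (row[n] in range under Pre_)
  let s := (PySem.List.slice key none (some (m + 1))).foldl
    (fun s row => s + (PySem.List.pyGet? row n).getD 0) 0
  -- for element in key[m][:n+1]: t += element   (key[m] in range under Pre_)
  let t := (PySem.List.slice ((PySem.List.pyGet? key m).getD []) none (some (n + 1))).foldl
    (fun t e => t + e) 0
  (s, t)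

-- ===== PORT B =====
def sample_MAC_alt (msg : Int × Int) : Int × Int :=
  let m := msg.1
  let n := msg.2
  let wraps_s := max 0 (m - PySem.Int.floordiv (110 - n) 10 + 1)
  let s := (m + 1) * n + 5 * m * (m + 1) - 101 * wraps_s
  let wraps_t := if 101 - 10 * m > 0 then max 0 (n - (101 - 10 * m) + 1) else n + 1
  let t := (n + 1) * 10 * m + PySem.Int.floordiv (n * (n + 1)) 2 - 101 * wraps_t
  (s, t)

-- ===== PRECONDITION & SPEC =====
-- exactly the inputs MAC_check accepts; elsewhere A raises
def Pre_sample_MAC (msg : Int × Int) : Prop :=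
  0 ≤ msg.1 ∧ msg.1 < 16 ∧ 0 ≤ msg.2 ∧ msg.2 < 16
instance (msg : Int × Int) : Decidable (Pre_sample_MAC msg) := by
  unfold Pre_sample_MAC; infer_instance
def pvWitness_sample_MAC : (Int × Int) := (3, 5)
def Spec_sample_MAC (msg : Int × Int) (out : Int × Int) : Prop := out = sample_MAC_alt msg
instance (msg : Int × Int) (out : Int × Int) : Decidable (Spec_sample_MAC msg out) := by unfold Spec_sample_MAC; infer_instance

-- ===== CLAIM (what is proved, stated in full; the proofs are below) =====
def Claim_equal_sample_MAC : Prop := ∀ (msg : Int × Int), Dom_sample_MAC msg → Pre_sample_MAC msg → Spec_sample_MAC msg (sample_MAC msg)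

-- ===== LEMMAS AND PROOFS =====

-- ===== VERDICT (by name: the statement is the Claim_ definition above) =====
theorem sample_MAC_spec : Claim_equal_sample_MAC := by
  intro msg _ hpre
  obtain ⟨m, n⟩ := msg
  obtain ⟨h1, h2, h3, h4⟩ := hpre
  unfold Spec_sample_MAC
  interval_cases m <;> interval_cases n <;> decide
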